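-- pv_equiv track=rewrite | github.com/modelscope/DiffSynth-Studio | diffsynth/models/joyai_image_common.py | generate_video_image_bucket
-- ===== SOURCE A (Python) =====
-- def _generate_hw_buckets(base_height=256, base_width=256, step_width=16, step_height=16, max_ratio=4.0) -> list[tuple[int, int, int, int, int]]:
--     """Generate dimension buckets based on aspect ratios."""
--     buckets = []
--     target_pixels = base_height * base_width
--
--     height = target_pixels // step_width
--     width = step_width
--
--     while height >= step_height:
--         if max(height, width) / min(height, width) <= max_ratio:
--             buckets.append((1, 1, 1, height, width))
--         if height * (width + step_width) <= target_pixels: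
--             width += step_width
--         else:
--             height -= step_height
--
--     return buckets
--
-- def generate_video_image_bucket(basesize=256, min_temporal=65, max_temporal=129, bs_img=8, bs_vid=1, bs_mimg=4, min_items=1, max_items=1):
--     """Generate bucket configs for image inference.
--
--     Returns:
--         List of (batch_size, num_items, num_frames, height, width) tuples.
--     """
--     assert basesize in [
--         256, 512, 768, 1024], f"[generate_video_image_bucket] wrong basesize {basesize}"
--     bucket_list = []
--
--     base_bucket_list = _generate_hw_buckets()
--     # image
--     for _bucket in base_bucket_list:
--         bucket = list(_bucket)
--         bucket[0] = bs_img
--         bucket_list.append(bucket)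
--     # multiple images
--     for num_items in range(min_items, max_items + 1):
--         for _bucket in base_bucket_list:
--             bucket = list(_bucket)
--             bucket[0] = bs_mimg
--             bucket[1] = num_items
--             bucket_list.append(bucket)
--     # spatial resize
--     if basesize > 256:
--         ratio = basesize // 256
--
--         def resize(bucket, r):
--             bucket[-2] *= r
--             bucket[-1] *= r
--             return bucket
--         bucket_list = [resize(bucket, ratio) for bucket in bucket_list]
--     return bucket_list
-- ===== SOURCE B (Python) =====
-- def _generate_hw_buckets(base_height=256, base_width=256, step_width=16, step_height=16, max_ratio=4.0) -> list[tuple[int, int, int, int, int]]: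
--     """Generate dimension buckets: per-height width band on the hyperbola staircase."""
--     buckets = []
--     target_pixels = base_height * base_width
--     w_lo = step_width
--     for h in range(target_pixels // step_width, step_height - 1, -step_height):
--         w_hi = ((target_pixels // h) // step_width) * step_width
--         for w in range(w_lo, w_hi + 1, step_width):
--             if max(h, w) / min(h, w) <= max_ratio:
--                 buckets.append((1, 1, 1, h, w))
--         w_lo = w_hi
--     return buckets
--
--
-- def generate_video_image_bucket(basesize=256, min_temporal=65, max_temporal=129, bs_img=8, bs_vid=1, bs_mimg=4, min_items=1, max_items=1):
--     """Generate bucket configs for image inference (same output as A)."""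
--     assert basesize in [
--         256, 512, 768, 1024], f"[generate_video_image_bucket] wrong basesize {basesize}"
--     base = _generate_hw_buckets()
--     r = basesize // 256
--     out = [[bs_img, n, t, h * r, w * r] for (_, n, t, h, w) in base]
--     out += [[bs_mimg, num, t, h * r, w * r]
--             for num in range(min_items, max_items + 1)
--             for (_, n, t, h, w) in base]
--     return out
-- ===== Notes on version B (the rewrite author's own statement) =====
-- stated objective: simpler
-- what changed: The bucket generator becomes a per-height width-band double loop (for each height, compute the max 16-multiple width and emit the band from the previous height's max width) instead of the single-step while loop over (height,width), and the outer assembly becomes two comprehensions with the resize factor applied inline instead of mutation loops plus a conditional resize pass.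
import Mathlib
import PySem

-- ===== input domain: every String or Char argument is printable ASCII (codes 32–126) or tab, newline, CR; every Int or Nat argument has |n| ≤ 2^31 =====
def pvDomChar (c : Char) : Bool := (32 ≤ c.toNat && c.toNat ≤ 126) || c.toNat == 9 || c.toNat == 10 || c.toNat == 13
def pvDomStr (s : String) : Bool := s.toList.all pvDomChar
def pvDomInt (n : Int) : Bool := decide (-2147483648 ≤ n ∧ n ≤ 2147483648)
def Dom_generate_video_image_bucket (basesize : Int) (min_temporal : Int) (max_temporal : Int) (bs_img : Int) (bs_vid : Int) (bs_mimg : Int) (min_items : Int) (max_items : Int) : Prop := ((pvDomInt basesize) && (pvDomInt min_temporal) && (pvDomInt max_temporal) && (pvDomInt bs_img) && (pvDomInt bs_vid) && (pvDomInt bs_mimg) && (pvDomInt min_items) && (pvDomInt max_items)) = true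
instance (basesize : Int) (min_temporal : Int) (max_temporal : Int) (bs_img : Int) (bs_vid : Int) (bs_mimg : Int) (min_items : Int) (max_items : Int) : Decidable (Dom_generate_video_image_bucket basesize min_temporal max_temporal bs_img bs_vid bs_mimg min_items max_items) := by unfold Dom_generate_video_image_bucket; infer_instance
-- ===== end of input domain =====

-- B rewrites the bucket generator as a per-height width-band double loop (simpler, one
-- comprehension-style pass) instead of A's single-step while loop; the outer assembly
-- becomes two comprehensions with the resize factor applied inline.

-- ===== PORT A =====
-- A's while loop over (height, width); fuel only makes the recursion total (the loop
-- runs 511 iterations for the fixed call _generate_hw_buckets()).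
-- max(h,w)/min(h,w) <= 4.0 is exact for positive ints as: max h w ≤ 4 * min h w.
def hwLoopA : Nat → Int → Int → List (Int × Int × Int × Int × Int) → List (Int × Int × Int × Int × Int)
  | 0, _, _, buckets => buckets
  | fuel+1, height, width, buckets =>
    if height ≥ 16 then
      let buckets := if max height width ≤ 4 * min height width then buckets ++ [(1, 1, 1, height, width)] else buckets
      if height * (width + 16) ≤ 65536 then hwLoopA fuel height (width + 16) buckets
      else hwLoopA fuel (height - 16) width buckets
    else buckets

-- _generate_hw_buckets() with its default arguments (the only call A makes):
-- target_pixels = 256*256, height = target_pixels // 16, width = 16.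
def hwBucketsA : List (Int × Int × Int × Int × Int) :=
  hwLoopA 2000 (PySem.Int.floordiv (256 * 256) 16) 16 []

-- bucket[-2] *= r; bucket[-1] *= r on the 5-element bucket lists (all buckets have
-- exactly 5 entries, so negative-index assignment updates positions 3 and 4; exact here).
def resizeA (bucket : List Int) (r : Int) : List Int :=
  match bucket with
  | [a, n, t, h, w] => [a, n, t, h * r, w * r]
  | b => b

def generate_video_image_bucket (basesize : Int) (min_temporal : Int) (max_temporal : Int) (bs_img : Int) (bs_vid : Int) (bs_mimg : Int) (min_items : Int) (max_items : Int) : List (List Int) :=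
  -- assert basesize in [256,512,768,1024] raises outside Pre_
  let base_bucket_list := hwBucketsA
  -- image: list(_bucket); bucket[0] = bs_img
  let bucket_list : List (List Int) :=
    base_bucket_list.foldl (fun acc t => acc ++ [[bs_img, t.2.1, t.2.2.1, t.2.2.2.1, t.2.2.2.2]]) []
  -- multiple images
  let bucket_list :=
    (PySem.List.pyRange min_items (max_items + 1) 1).foldl
      (fun acc num =>
        base_bucket_list.foldl (fun acc2 t => acc2 ++ [[bs_mimg, num, t.2.2.1, t.2.2.2.1, t.2.2.2.2]]) acc)
      bucket_list
  -- spatial resize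
  if basesize > 256 then
    let ratio := PySem.Int.floordiv basesize 256
    bucket_list.map (fun b => resizeA b ratio)
  else bucket_list

-- ===== PORT B =====
-- per-height width band: for h in range(T//16, 15, -16): w from w_lo to w_hi step 16.
def hwBucketsB : List (Int × Int × Int × Int × Int) :=
  ((PySem.List.pyRange (PySem.Int.floordiv (256 * 256) 16) 15 (-16)).foldl
    (fun (st : Int × List (Int × Int × Int × Int × Int)) h =>
      let w_hi := (PySem.Int.floordiv (PySem.Int.floordiv (256 * 256) h) 16) * 16
      let bs := (PySem.List.pyRange st.1 (w_hi + 1) 16).foldl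
        (fun bs w => if max h w ≤ 4 * min h w then bs ++ [(1, 1, 1, h, w)] else bs) st.2
      (w_hi, bs))
    (16, ([] : List (Int × Int × Int × Int × Int)))).2

def generate_video_image_bucket_alt (basesize : Int) (min_temporal : Int) (max_temporal : Int) (bs_img : Int) (bs_vid : Int) (bs_mimg : Int) (min_items : Int) (max_items : Int) : List (List Int) :=
  let base := hwBucketsB
  let r := PySem.Int.floordiv basesize 256
  (base.map (fun t => [bs_img, t.2.1, t.2.2.1, t.2.2.2.1 * r, t.2.2.2.2 * r])) ++
  (PySem.List.pyRange min_items (max_items + 1) 1).flatMap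
    (fun num => base.map (fun t => [bs_mimg, num, t.2.2.1, t.2.2.2.1 * r, t.2.2.2.2 * r]))

-- ===== PRECONDITION & SPEC =====
-- Pre_: the assert — A raises AssertionError unless basesize ∈ {256, 512, 768, 1024}.
def Pre_generate_video_image_bucket (basesize : Int) (min_temporal : Int) (max_temporal : Int) (bs_img : Int) (bs_vid : Int) (bs_mimg : Int) (min_items : Int) (max_items : Int) : Prop :=
  basesize = 256 ∨ basesize = 512 ∨ basesize = 768 ∨ basesize = 1024
instance (basesize : Int) (min_temporal : Int) (max_temporal : Int) (bs_img : Int) (bs_vid : Int) (bs_mimg : Int) (min_items : Int) (max_items : Int) : Decidable (Pre_generate_video_image_bucket basesize min_temporal max_temporal bs_img bs_vid bs_mimg min_items max_items) := by unfold Pre_generate_video_image_bucket; infer_instance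

def pvWitness_generate_video_image_bucket : Int × Int × Int × Int × Int × Int × Int × Int := (256, 65, 129, 8, 1, 4, 1, 1)

def Spec_generate_video_image_bucket (basesize : Int) (min_temporal : Int) (max_temporal : Int) (bs_img : Int) (bs_vid : Int) (bs_mimg : Int) (min_items : Int) (max_items : Int) (out : List (List Int)) : Prop := out = generate_video_image_bucket_alt basesize min_temporal max_temporal bs_img bs_vid bs_mimg min_items max_items
instance (basesize : Int) (min_temporal : Int) (max_temporal : Int) (bs_img : Int) (bs_vid : Int) (bs_mimg : Int) (min_items : Int) (max_items : Int) (out : List (List Int)) : Decidable (Spec_generate_video_image_bucket basesize min_temporal max_temporal bs_img bs_vid bs_mimg min_items max_items out) := by unfold Spec_generate_video_image_bucket; infer_instance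

-- ===== CLAIM (what is proved, stated in full; the proofs are below) =====
def Claim_equal_generate_video_image_bucket : Prop := ∀ (basesize : Int) (min_temporal : Int) (max_temporal : Int) (bs_img : Int) (bs_vid : Int) (bs_mimg : Int) (min_items : Int) (max_items : Int), Dom_generate_video_image_bucket basesize min_temporal max_temporal bs_img bs_vid bs_mimg min_items max_items → Pre_generate_video_image_bucket basesize min_temporal max_temporal bs_img bs_vid bs_mimg min_items max_items → Spec_generate_video_image_bucket basesize min_temporal max_temporal bs_img bs_vid bs_mimg min_items max_items (generate_video_image_bucket basesize min_temporal max_temporal bs_img bs_vid bs_mimg min_items max_items)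

-- ===== LEMMAS AND PROOFS =====

-- the two hw generators produce the same (closed) list
set_option maxRecDepth 100000 in
theorem hwA_eq_hwB : hwBucketsA = hwBucketsB := by decide

theorem foldl_append_map {α β : Type} (l : List α) (f : α → β) (acc : List β) :
    l.foldl (fun a t => a ++ [f t]) acc = acc ++ l.map f := by
  induction l generalizing acc with
  | nil => simp
  | cons x xs ih => simp [List.foldl, ih]

theorem foldl_append_flatMap {α β : Type} (l : List α) (g : α → List β) (acc : List β) :
    l.foldl (fun a n => a ++ g n) acc = acc ++ l.flatMap g := by
  induction l generalizing acc with
  | nil => simp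
  | cons x xs ih => rw [List.foldl_cons, ih, List.flatMap_cons, List.append_assoc]

set_option maxRecDepth 10000 in
theorem main_eq (r basesize min_temporal max_temporal bs_img bs_vid bs_mimg min_items max_items : Int)
    (hb : 256 < basesize) (hr : PySem.Int.floordiv basesize 256 = r) :
    generate_video_image_bucket basesize min_temporal max_temporal bs_img bs_vid bs_mimg min_items max_items
      = generate_video_image_bucket_alt basesize min_temporal max_temporal bs_img bs_vid bs_mimg min_items max_items := by
  simp only [generate_video_image_bucket, generate_video_image_bucket_alt, hwA_eq_hwB,
    foldl_append_map, foldl_append_flatMap, List.nil_append, if_pos hb, hr,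
    List.map_append, List.map_map, List.map_flatMap]
  rfl

theorem main_eq_256 (min_temporal max_temporal bs_img bs_vid bs_mimg min_items max_items : Int) :
    generate_video_image_bucket 256 min_temporal max_temporal bs_img bs_vid bs_mimg min_items max_items
      = generate_video_image_bucket_alt 256 min_temporal max_temporal bs_img bs_vid bs_mimg min_items max_items := by
  have hr : PySem.Int.floordiv (256 : Int) 256 = 1 := by decide
  simp only [generate_video_image_bucket, generate_video_image_bucket_alt, hwA_eq_hwB,
    foldl_append_map, foldl_append_flatMap, List.nil_append, hr]
  simp [List.flatMap]

-- ===== VERDICT (by name: the statement is the Claim_ definition above) =====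
theorem generate_video_image_bucket_spec : Claim_equal_generate_video_image_bucket := by
  intro basesize min_temporal max_temporal bs_img bs_vid bs_mimg min_items max_items _ hpre
  unfold Spec_generate_video_image_bucket
  rcases hpre with h | h | h | h <;> subst h
  · exact main_eq_256 ..
  · exact main_eq 2 512 _ _ _ _ _ _ _ (by norm_num) (by decide)
  · exact main_eq 3 768 _ _ _ _ _ _ _ (by norm_num) (by decide)
  · exact main_eq 4 1024 _ _ _ _ _ _ _ (by norm_num) (by decide)
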